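-- pv_equiv track=rewrite | github.com/konrad-kocik/advent-of-code | 2020/day_12_rain_risk/navigator.py | _calculate_destination_coordinates
-- ===== SOURCE A (Python) =====
-- def _calculate_destination_coordinates(instructions):
--     moves = {
--         'N': (0, 1),
--         'E': (1, 0),
--         'S': (0, -1),
--         'W': (-1, 0)
--     }
--
--     rotations = {
--         'N': {'R': {90: 'E', 180: 'S', 270: 'W'},
--               'L': {90: 'W', 180: 'S', 270: 'E'}},
--         'E': {'R': {90: 'S', 180: 'W', 270: 'N'},
--               'L': {90: 'N', 180: 'W', 270: 'S'}},
--         'S': {'R': {90: 'W', 180: 'N', 270: 'E'},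
--               'L': {90: 'E', 180: 'N', 270: 'W'}},
--         'W': {'R': {90: 'N', 180: 'E', 270: 'S'},
--               'L': {90: 'S', 180: 'E', 270: 'N'}}
--     }
--
--     ship_coordinates = [0, 0]
--     ship_direction = 'E'
--
--     for action, value in instructions:
--         if action in ('N', 'E', 'S', 'W'):
--             ship_coordinates[0] += moves[action][0] * value
--             ship_coordinates[1] += moves[action][1] * value
--
--         if action in ('R', 'L'):
--             ship_direction = rotations[ship_direction][action][value]
--
--         if action == 'F':
--             ship_coordinates[0] += moves[ship_direction][0] * value
--             ship_coordinates[1] += moves[ship_direction][1] * value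
--
--     return ship_coordinates
-- ===== SOURCE B (Python) =====
-- def _calculate_destination_coordinates(instructions):
--     quarters = {90: 1, 180: 2, 270: 3}
--     # stage 1: cumulative signed quarter-turns (clockwise positive) BEFORE each instruction
--     rots = []
--     r = 0
--     for action, value in instructions:
--         rots.append(r)
--         if action == 'R':
--             r += quarters[value]
--         elif action == 'L':
--             r -= quarters[value]
--     # stage 2: stateless sum of per-instruction displacement vectors
--     headings = [(1, 0), (0, -1), (-1, 0), (0, 1)]  # East rotated clockwise k quarters
--     moves = {'N': (0, 1), 'E': (1, 0), 'S': (0, -1), 'W': (-1, 0)}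
--     x = y = 0
--     for (action, value), r0 in zip(instructions, rots):
--         if action in moves:
--             dx, dy = moves[action]
--         elif action == 'F':
--             dx, dy = headings[r0 % 4]
--         else:
--             continue
--         x += dx * value
--         y += dy * value
--     return [x, y]
-- ===== Notes on version B (the rewrite author's own statement) =====
-- stated objective: alternative
-- what changed: Replaces A's single stateful pass (direction string threaded through a 24-entry nested rotations table) by two staged passes: a prefix-sum pass over signed quarter-turns, then a stateless summation of per-instruction displacement vectors where F looks up its heading by the cumulative rotation mod 4.
import Mathlib
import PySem

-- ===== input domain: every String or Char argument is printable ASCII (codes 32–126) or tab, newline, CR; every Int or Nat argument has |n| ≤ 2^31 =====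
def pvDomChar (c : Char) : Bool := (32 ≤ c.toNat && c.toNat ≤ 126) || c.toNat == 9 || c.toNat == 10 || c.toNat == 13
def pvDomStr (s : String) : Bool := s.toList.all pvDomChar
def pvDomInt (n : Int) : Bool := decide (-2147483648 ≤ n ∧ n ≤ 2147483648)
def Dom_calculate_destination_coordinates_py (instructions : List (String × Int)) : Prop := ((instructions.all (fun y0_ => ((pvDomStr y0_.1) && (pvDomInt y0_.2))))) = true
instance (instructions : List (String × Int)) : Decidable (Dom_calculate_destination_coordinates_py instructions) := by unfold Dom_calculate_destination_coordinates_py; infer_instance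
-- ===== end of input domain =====

-- B replaces A's stateful direction-string pass by two staged passes: a prefix sum of
-- signed quarter-turns, then a stateless sum of displacement vectors (objective: alternative).

-- ===== PORT A =====
-- the `moves` dict (total on the four keys it is ever queried with)
def pvMovesA (a : String) : Int × Int :=
  if a = "N" then (0, 1) else if a = "E" then (1, 0)
  else if a = "S" then (0, -1) else (-1, 0)

-- the nested `rotations` dict; `none` = KeyError on the innermost lookup
def pvRotA (d a : String) (v : Int) : Option String :=
  match d, a, v with
  | "N", "R", 90 => some "E" | "N", "R", 180 => some "S" | "N", "R", 270 => some "W"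
  | "N", "L", 90 => some "W" | "N", "L", 180 => some "S" | "N", "L", 270 => some "E"
  | "E", "R", 90 => some "S" | "E", "R", 180 => some "W" | "E", "R", 270 => some "N"
  | "E", "L", 90 => some "N" | "E", "L", 180 => some "W" | "E", "L", 270 => some "S"
  | "S", "R", 90 => some "W" | "S", "R", 180 => some "N" | "S", "R", 270 => some "E"
  | "S", "L", 90 => some "E" | "S", "L", 180 => some "N" | "S", "L", 270 => some "W"
  | "W", "R", 90 => some "N" | "W", "R", 180 => some "E" | "W", "R", 270 => some "S"
  | "W", "L", 90 => some "S" | "W", "L", 180 => some "E" | "W", "L", 270 => some "N"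
  | _, _, _ => none

-- one loop iteration of A; `none` propagates a KeyError
def pvStepA (st : Option (Int × Int × String)) (iv : String × Int) : Option (Int × Int × String) :=
  match st with
  | none => none
  | some (x, y, d) =>
    let a := iv.1
    let v := iv.2
    let x1 := if a = "N" ∨ a = "E" ∨ a = "S" ∨ a = "W" then x + (pvMovesA a).1 * v else x
    let y1 := if a = "N" ∨ a = "E" ∨ a = "S" ∨ a = "W" then y + (pvMovesA a).2 * v else y
    match (if a = "R" ∨ a = "L" then pvRotA d a v else some d) with
    | none => none
    | some d1 =>
      let x2 := if a = "F" then x1 + (pvMovesA d1).1 * v else x1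
      let y2 := if a = "F" then y1 + (pvMovesA d1).2 * v else y1
      some (x2, y2, d1)

def calculate_destination_coordinates_py (instructions : List (String × Int)) : List Int :=
  match instructions.foldl pvStepA (some (0, 0, "E")) with
  | some (x, y, _) => [x, y]
  | none => []   -- unreachable under Pre_ (Python raises KeyError here)

-- ===== PORT B =====
def pvMovesB (a : String) : Int × Int :=
  if a = "N" then (0, 1) else if a = "E" then (1, 0)
  else if a = "S" then (0, -1) else (-1, 0)

-- the `quarters` dict; `none` = KeyError
def pvQuartersB (v : Int) : Option Int :=
  if v = 90 then some 1 else if v = 180 then some 2 else if v = 270 then some 3 else none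

-- stage 1 loop body: append the running rotation count, then update it; none = KeyError
def pvRotsStep (st : Option (List Int × Int)) (iv : String × Int) : Option (List Int × Int) :=
  match st with
  | none => none
  | some (rots, r) =>
    if iv.1 = "R" then
      match pvQuartersB iv.2 with
      | none => none
      | some q => some (rots ++ [r], r + q)
    else if iv.1 = "L" then
      match pvQuartersB iv.2 with
      | none => none
      | some q => some (rots ++ [r], r - q)
    else some (rots ++ [r], r)

-- headings[r % 4]; the index r % 4 is always 0..3, so the list lookup is total
def pvHeadingB (r : Int) : Int × Int :=
  if r % 4 = 0 then (1, 0) else if r % 4 = 1 then (0, -1)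
  else if r % 4 = 2 then (-1, 0) else (0, 1)

-- stage 2 loop body: stateless per-instruction displacement
def pvSumStep (st : Int × Int) (p : (String × Int) × Int) : Int × Int :=
  let a := p.1.1
  let v := p.1.2
  if a = "N" ∨ a = "E" ∨ a = "S" ∨ a = "W" then
    let m := pvMovesB a
    (st.1 + m.1 * v, st.2 + m.2 * v)
  else if a = "F" then
    let h := pvHeadingB p.2
    (st.1 + h.1 * v, st.2 + h.2 * v)
  else st

def calculate_destination_coordinates_py_alt (instructions : List (String × Int)) : List Int :=
  match instructions.foldl pvRotsStep (some ([], 0)) with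
  | none => []   -- unreachable under Pre_ (Python raises KeyError here)
  | some (rots, _) =>
    let p := (instructions.zip rots).foldl pvSumStep (0, 0)
    [p.1, p.2]

-- ===== PRECONDITION & SPEC =====
-- Pre_ excludes exactly the inputs where Python A raises KeyError: a rotation
-- instruction ('R'/'L') whose value is not 90, 180 or 270.
def Pre_calculate_destination_coordinates_py (instructions : List (String × Int)) : Prop :=
  ∀ p ∈ instructions, (p.1 = "R" ∨ p.1 = "L") → (p.2 = 90 ∨ p.2 = 180 ∨ p.2 = 270)
instance (instructions : List (String × Int)) : Decidable (Pre_calculate_destination_coordinates_py instructions) := by unfold Pre_calculate_destination_coordinates_py; infer_instance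

def pvWitness_calculate_destination_coordinates_py : (List (String × Int)) :=
  [("F", 10), ("N", 3), ("F", 7), ("R", 90), ("F", 11), ("L", 270)]

def Spec_calculate_destination_coordinates_py (instructions : List (String × Int)) (out : List Int) : Prop := out = calculate_destination_coordinates_py_alt instructions
instance (instructions : List (String × Int)) (out : List Int) : Decidable (Spec_calculate_destination_coordinates_py instructions out) := by unfold Spec_calculate_destination_coordinates_py; infer_instance

-- ===== CLAIM (what is proved, stated in full; the proofs are below) =====
def Claim_equal_calculate_destination_coordinates_py : Prop := ∀ (instructions : List (String × Int)), Dom_calculate_destination_coordinates_py instructions → Pre_calculate_destination_coordinates_py instructions → Spec_calculate_destination_coordinates_py instructions (calculate_destination_coordinates_py instructions)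

-- ===== LEMMAS AND PROOFS =====

-- signed quarter-turn delta of one instruction (proof-side mirror of stage 1)
def pvDelta (a : String) (v : Int) : Int :=
  if a = "R" then (if v = 90 then 1 else if v = 180 then 2 else 3)
  else if a = "L" then (if v = 90 then -1 else if v = 180 then -2 else -3)
  else 0

-- the rotation-prefix list stage 1 produces, starting from running count r
def pvRotsOf : List (String × Int) → Int → List Int
  | [], _ => []
  | p :: t, r => r :: pvRotsOf t (r + pvDelta p.1 p.2)

-- index of a direction string in B's headings list
def pvDirIdx (d : String) : Int :=
  if d = "E" then 0 else if d = "S" then 1 else if d = "W" then 2 else 3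

lemma pvRotsStep_ok (rots : List Int) (r : Int) (a : String) (v : Int)
    (h : (a = "R" ∨ a = "L") → (v = 90 ∨ v = 180 ∨ v = 270)) :
    pvRotsStep (some (rots, r)) (a, v) = some (rots ++ [r], r + pvDelta a v) := by
  by_cases hR : a = "R"
  · rcases h (Or.inl hR) with rfl | rfl | rfl <;> subst hR <;>
      simp [pvRotsStep, pvQuartersB, pvDelta]
  · by_cases hL : a = "L"
    · rcases h (Or.inr hL) with rfl | rfl | rfl <;> subst hL <;>
        simp [pvRotsStep, pvQuartersB, pvDelta, Int.sub_eq_add_neg]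
    · simp [pvRotsStep, hR, hL, pvDelta]

lemma pvRots_fold (l : List (String × Int)) (acc : List Int) (r : Int)
    (hok : ∀ p ∈ l, (p.1 = "R" ∨ p.1 = "L") → (p.2 = 90 ∨ p.2 = 180 ∨ p.2 = 270)) :
    ∃ rfin, l.foldl pvRotsStep (some (acc, r)) = some (acc ++ pvRotsOf l r, rfin) := by
  induction l generalizing acc r with
  | nil => exact ⟨r, by simp [pvRotsOf]⟩
  | cons p t ih =>
    obtain ⟨a, v⟩ := p
    obtain ⟨rfin, hfin⟩ := ih (acc ++ [r]) (r + pvDelta a v)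
      (fun q hq => hok q (List.mem_cons_of_mem _ hq))
    refine ⟨rfin, ?_⟩
    simp only [List.foldl_cons, pvRotsStep_ok acc r a v (hok (a, v) List.mem_cons_self),
      pvRotsOf, hfin, List.append_assoc, List.singleton_append]

-- proof-side reading of the rotation table as a total function (only used where it hits)
def pvRotDir (d a : String) (v : Int) : String :=
  match pvRotA d a v with
  | some d' => d'
  | none => d

lemma pvStep_shift (x y r : Int) (d a : String) (v : Int)
    (hd : d = "N" ∨ d = "E" ∨ d = "S" ∨ d = "W")
    (hr : r % 4 = pvDirIdx d)
    (hok : (a = "R" ∨ a = "L") → (v = 90 ∨ v = 180 ∨ v = 270)) :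
    ∃ d', pvStepA (some (x, y, d)) (a, v) =
        some ((pvSumStep (x, y) ((a, v), r)).1, (pvSumStep (x, y) ((a, v), r)).2, d') ∧
      (d' = "N" ∨ d' = "E" ∨ d' = "S" ∨ d' = "W") ∧
      (r + pvDelta a v) % 4 = pvDirIdx d' := by
  by_cases hR : a = "R"
  · subst hR
    have hv := hok (Or.inl rfl)
    refine ⟨pvRotDir d "R" v, ?_, ?_, ?_⟩
    · rcases hv with rfl | rfl | rfl <;> rcases hd with rfl | rfl | rfl | rfl <;>
        simp [pvStepA, pvRotA, pvSumStep, pvRotDir]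
    · rcases hv with rfl | rfl | rfl <;> rcases hd with rfl | rfl | rfl | rfl <;>
        simp [pvRotDir, pvRotA]
    · rcases hv with rfl | rfl | rfl <;> rcases hd with rfl | rfl | rfl | rfl <;>
        (simp [pvDirIdx, pvDelta, pvRotDir, pvRotA] at hr ⊢; omega)
  · by_cases hL : a = "L"
    · subst hL
      have hv := hok (Or.inr rfl)
      refine ⟨pvRotDir d "L" v, ?_, ?_, ?_⟩
      · rcases hv with rfl | rfl | rfl <;> rcases hd with rfl | rfl | rfl | rfl <;>
          simp [pvStepA, pvRotA, pvSumStep, pvRotDir]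
      · rcases hv with rfl | rfl | rfl <;> rcases hd with rfl | rfl | rfl | rfl <;>
          simp [pvRotDir, pvRotA]
      · rcases hv with rfl | rfl | rfl <;> rcases hd with rfl | rfl | rfl | rfl <;>
          (simp [pvDirIdx, pvDelta, pvRotDir, pvRotA] at hr ⊢; omega)
    · have hdelta : pvDelta a v = 0 := by simp [pvDelta, hR, hL]
      by_cases hM : a = "N" ∨ a = "E" ∨ a = "S" ∨ a = "W"
      · rcases hM with rfl | rfl | rfl | rfl <;>
          exact ⟨d, by simp [pvStepA, pvSumStep, pvMovesA, pvMovesB], hd, by simp [hdelta, hr]⟩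
      · by_cases hF : a = "F"
        · subst hF
          have hhd : pvHeadingB r = pvMovesA d := by
            rcases hd with rfl | rfl | rfl | rfl <;>
              simp [pvDirIdx] at hr <;> simp [pvHeadingB, pvMovesA, hr]
          exact ⟨d, by simp [pvStepA, pvSumStep, hhd], hd, by simp [hdelta, hr]⟩
        · exact ⟨d, by simp [pvStepA, pvSumStep, hR, hL, hM, hF], hd, by simp [hdelta, hr]⟩

lemma pvMain_fold (l : List (String × Int)) (x y r : Int) (d : String)
    (hd : d = "N" ∨ d = "E" ∨ d = "S" ∨ d = "W")
    (hr : r % 4 = pvDirIdx d)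
    (hok : ∀ p ∈ l, (p.1 = "R" ∨ p.1 = "L") → (p.2 = 90 ∨ p.2 = 180 ∨ p.2 = 270)) :
    ∃ d', l.foldl pvStepA (some (x, y, d)) =
      some (((l.zip (pvRotsOf l r)).foldl pvSumStep (x, y)).1,
            ((l.zip (pvRotsOf l r)).foldl pvSumStep (x, y)).2, d') := by
  induction l generalizing x y r d with
  | nil => exact ⟨d, by simp⟩
  | cons p t ih =>
    obtain ⟨a, v⟩ := p
    obtain ⟨d1, hstep, hd1, hr1⟩ :=
      pvStep_shift x y r d a v hd hr (hok (a, v) List.mem_cons_self)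
    obtain ⟨d', hfold⟩ :=
      ih (pvSumStep (x, y) ((a, v), r)).1 (pvSumStep (x, y) ((a, v), r)).2
        (r + pvDelta a v) d1 hd1 hr1 (fun q hq => hok q (List.mem_cons_of_mem _ hq))
    exact ⟨d', by simp only [List.foldl_cons, hstep, pvRotsOf, List.zip_cons_cons, hfold]⟩

-- ===== VERDICT (by name: the statement is the Claim_ definition above) =====
theorem calculate_destination_coordinates_py_spec : Claim_equal_calculate_destination_coordinates_py := by
  intro instructions _ hpre
  unfold Spec_calculate_destination_coordinates_py
  unfold calculate_destination_coordinates_py calculate_destination_coordinates_py_alt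
  obtain ⟨rfin, hrots⟩ := pvRots_fold instructions [] 0 hpre
  obtain ⟨d', hA⟩ := pvMain_fold instructions 0 0 0 "E" (by simp) (by simp [pvDirIdx]) hpre
  rw [hrots, hA]
  simp
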